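-- pv_equiv track=rewrite | github.com/almachay-lpsr/class-samples | CipherTool.py | getReorderedLowercaseAlphabet
-- ===== SOURCE A (Python) =====
-- import string
--
-- def getReorderedLowercaseAlphabet(key):
-- 	letter= string.ascii_lowercase
-- 	letterList = []
-- 	count = 0
-- 	while count < 26:
-- 		letterList.append(letter[(key + count) % 26])
-- 		count = count + 1
-- 	return letterList
-- ===== SOURCE B (Python) =====
-- import string
--
-- def getReorderedLowercaseAlphabet(key):
--     k = key % 26
--     return list(string.ascii_lowercase[k:] + string.ascii_lowercase[:k])
-- ===== Notes on version B (the rewrite author's own statement) =====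
-- stated objective: idiomatic
-- what changed: Replaces the while loop that indexes the alphabet with a per-element modulo by a single closed-form rotation: compute the effective shift k once and return list(s[k:] + s[:k]).
import Mathlib
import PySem

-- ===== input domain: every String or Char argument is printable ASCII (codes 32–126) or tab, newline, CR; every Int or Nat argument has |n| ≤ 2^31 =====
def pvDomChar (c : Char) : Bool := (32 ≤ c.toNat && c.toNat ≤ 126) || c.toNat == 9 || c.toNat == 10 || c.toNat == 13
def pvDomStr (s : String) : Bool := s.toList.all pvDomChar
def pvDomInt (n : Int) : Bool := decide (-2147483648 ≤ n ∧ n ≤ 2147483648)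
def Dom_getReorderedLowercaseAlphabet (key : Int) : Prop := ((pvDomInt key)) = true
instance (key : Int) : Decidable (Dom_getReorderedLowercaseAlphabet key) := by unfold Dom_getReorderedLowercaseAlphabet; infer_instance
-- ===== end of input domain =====

-- B replaces A's 26-step loop with a per-element modulo index by one closed-form
-- slice rotation (k = key % 26; s[k:] + s[:k]); same return value, idiomatic, not faster.

-- string.ascii_lowercase, shared module constant of both programs
def pvAsciiLowercase : List Char :=
  ['a','b','c','d','e','f','g','h','i','j','k','l','m',
   'n','o','p','q','r','s','t','u','v','w','x','y','z']

-- ===== PORT A =====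
-- while count < 26: letterList.append(letter[(key + count) % 26]); count += 1
def getReorderedLowercaseAlphabet (key : Int) : List String :=
  let letter := pvAsciiLowercase
  (PySem.List.pyRange 0 26 1).foldl
    (fun letterList count =>
      letterList ++ [String.singleton (PySem.List.pyGetD letter (PySem.Int.mod (key + count) 26) 'a')])
    []

-- ===== PORT B =====
-- k = key % 26; return list(s[k:] + s[:k])
def getReorderedLowercaseAlphabet_alt (key : Int) : List String :=
  let s := pvAsciiLowercase
  let k := PySem.Int.mod key 26
  (PySem.List.slice s (some k) none ++ PySem.List.slice s none (some k)).map String.singleton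

-- ===== PRECONDITION & SPEC =====
def Spec_getReorderedLowercaseAlphabet (key : Int) (out : List String) : Prop := out = getReorderedLowercaseAlphabet_alt key
instance (key : Int) (out : List String) : Decidable (Spec_getReorderedLowercaseAlphabet key out) := by unfold Spec_getReorderedLowercaseAlphabet; infer_instance

-- ===== CLAIM (what is proved, stated in full; the proofs are below) =====
def Claim_equal_getReorderedLowercaseAlphabet : Prop := ∀ (key : Int), Dom_getReorderedLowercaseAlphabet key → Spec_getReorderedLowercaseAlphabet key (getReorderedLowercaseAlphabet key)

-- ===== LEMMAS AND PROOFS =====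

-- shifting the argument of A's per-element modulo by r = key % 26 changes nothing
theorem pv_mod_shift (key c : Int) :
    PySem.Int.mod (key + c) 26 = PySem.Int.mod (PySem.Int.mod key 26 + c) 26 := by
  simp only [PySem.Int.mod_eq_emod_of_pos (show (0:Int) < 26 by norm_num)]
  omega

-- A's value depends on key only through key % 26
theorem pv_A_mod (key : Int) :
    getReorderedLowercaseAlphabet key = getReorderedLowercaseAlphabet (PySem.Int.mod key 26) := by
  unfold getReorderedLowercaseAlphabet
  simp only [PySem.List.foldl_append_singleton_eq_map, List.nil_append]
  refine List.map_congr_left (fun c _ => ?_)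
  rw [pv_mod_shift]

theorem pv_B_mod (key : Int) :
    getReorderedLowercaseAlphabet_alt key = getReorderedLowercaseAlphabet_alt (PySem.Int.mod key 26) := by
  unfold getReorderedLowercaseAlphabet_alt
  simp only [PySem.Int.mod_eq_emod_of_pos (show (0:Int) < 26 by norm_num),
    Int.emod_emod_of_dvd _ (dvd_refl (26:Int))]

-- ===== VERDICT (by name: the statement is the Claim_ definition above) =====
theorem getReorderedLowercaseAlphabet_spec : Claim_equal_getReorderedLowercaseAlphabet := by
  intro key _
  unfold Spec_getReorderedLowercaseAlphabet
  rw [pv_A_mod, pv_B_mod]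
  have h0 : 0 ≤ PySem.Int.mod key 26 := PySem.Int.mod_nonneg key (by norm_num)
  have h1 : PySem.Int.mod key 26 < 26 := PySem.Int.mod_lt key (by norm_num)
  interval_cases (PySem.Int.mod key 26) <;> decide
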